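-- pv_equiv track=rewrite | github.com/AOccLib/ground_pddl_learning | feature_generation/make_graphs.py | get_dict_from_state
-- ===== SOURCE A (Python) =====
-- def get_dict_from_state(state):
--     ext_state = dict()
--     for atom in state:
--         fields = atom[1:-1].split(' ')
--         pred = fields[0]
--         args = fields[1:]
--         if pred not in ext_state: ext_state[pred] = set()
--         ext_state[pred].add(tuple(args))
--     return ext_state
-- ===== SOURCE B (Python) =====
-- def get_dict_from_state(state):
--     parsed = []
--     for atom in state:
--         fields = atom[1:-1].split(' ')
--         parsed.append((fields[0], tuple(fields[1:])))
--     preds = list(dict.fromkeys(pred for pred, _ in parsed))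
--     return {p: {args for q, args in parsed if q == p} for p in preds}
-- ===== Notes on version B (the rewrite author's own statement) =====
-- stated objective: alternative
-- what changed: Replaces A's single-pass dict-of-sets hash accumulation with a parse-once pass, an ordered dedup of the predicates, and one filter pass per distinct predicate building each group as a comprehension.
import Mathlib
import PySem

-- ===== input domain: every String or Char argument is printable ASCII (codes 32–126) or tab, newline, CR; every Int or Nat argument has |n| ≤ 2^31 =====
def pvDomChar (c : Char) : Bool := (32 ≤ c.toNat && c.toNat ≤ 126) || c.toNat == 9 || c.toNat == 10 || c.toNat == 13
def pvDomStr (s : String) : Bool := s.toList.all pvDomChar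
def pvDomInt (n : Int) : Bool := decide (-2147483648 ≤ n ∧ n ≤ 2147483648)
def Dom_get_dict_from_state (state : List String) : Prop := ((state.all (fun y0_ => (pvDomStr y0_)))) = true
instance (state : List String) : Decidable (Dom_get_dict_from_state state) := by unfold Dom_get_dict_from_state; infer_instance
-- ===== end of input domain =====

-- B replaces A's single-pass dict-of-sets hash accumulation by parse-once / dedup-predicates / per-predicate filter grouping
-- (objective: alternative decomposition, same return value).

-- ===== PORT A =====
-- atom[1:-1].split(' '); split? is some since the separator " " is nonempty, fields is never empty so fields[0] = headD
def get_dict_from_state (state : List String) : List (String × List (List String)) :=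
  (state.foldl
    (fun ext atom =>
      let fields := (PySem.Str.split? (PySem.Str.slice atom (some 1) (some (-1))) " ").getD []
      let pred := fields.headD ""
      let args := fields.tail
      let ext' := if ext.contains pred then ext else ext.insert pred PySem.Set.empty
      ext'.modify pred PySem.Set.empty (fun s => PySem.Set.add s args))
    PySem.Dict.empty).items

-- ===== PORT B =====
-- (fields[0], tuple(fields[1:])) for each atom
def pvParseAtom (atom : String) : String × List String :=
  let fields := (PySem.Str.split? (PySem.Str.slice atom (some 1) (some (-1))) " ").getD []
  (fields.headD "", fields.tail)

def get_dict_from_state_alt (state : List String) : List (String × List (List String)) :=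
  let parsed := state.map pvParseAtom
  let preds := PySem.List.dedup (parsed.map (·.1))
  preds.map (fun p => (p, PySem.Set.ofList ((parsed.filter (fun q => q.1 == p)).map (·.2))))

-- ===== PRECONDITION & SPEC =====
def Spec_get_dict_from_state (state : List String) (out : List (String × List (List String))) : Prop := out = get_dict_from_state_alt state
instance (state : List String) (out : List (String × List (List String))) : Decidable (Spec_get_dict_from_state state out) := by unfold Spec_get_dict_from_state; infer_instance

-- ===== CLAIM (what is proved, stated in full; the proofs are below) =====
def Claim_equal_get_dict_from_state : Prop := ∀ (state : List String), Dom_get_dict_from_state state → Spec_get_dict_from_state state (get_dict_from_state state)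

-- ===== LEMMAS AND PROOFS =====

-- A's loop body, with the atom already parsed
def pvStep (d : PySem.Dict String (PySem.Set (List String))) (x : String × List String) :
    PySem.Dict String (PySem.Set (List String)) :=
  let d' := if d.contains x.1 then d else d.insert x.1 PySem.Set.empty
  d'.modify x.1 PySem.Set.empty (fun s => PySem.Set.add s x.2)

lemma pvStep_eq (d : PySem.Dict String (PySem.Set (List String))) (x : String × List String) :
    pvStep d x = d.modify x.1 PySem.Set.empty (fun s => PySem.Set.add s x.2) := by
  by_cases h : d.contains x.1
  · simp [pvStep, h]
  · simp only [Bool.not_eq_true] at h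
    simp [pvStep, h, PySem.Dict.modify, PySem.Dict.getD_insert_self,
      PySem.Dict.insert_insert_self, PySem.Dict.getD_of_not_contains _ _ h]

lemma pvGetD_fold (l : List (String × List String))
    (d : PySem.Dict String (PySem.Set (List String))) (c : String) :
    (l.foldl (fun d x => d.modify x.1 PySem.Set.empty (fun s => PySem.Set.add s x.2)) d).getD c PySem.Set.empty
      = PySem.Set.update (d.getD c PySem.Set.empty) ((l.filter (fun q => q.1 == c)).map (·.2)) := by
  induction l generalizing d with
  | nil => simp [PySem.Set.update]
  | cons x t ih =>
    simp only [List.foldl_cons, ih, List.filter_cons]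
    by_cases h : x.1 = c
    · simp [h, PySem.Set.update]
    · simp [h, PySem.Dict.getD_modify, Ne.symm h]

lemma pvItems_fold (l : List (String × List String)) :
    (l.foldl pvStep PySem.Dict.empty).items
      = (PySem.List.dedup (l.map (·.1))).map
          (fun p => (p, PySem.Set.ofList ((l.filter (fun q => q.1 == p)).map (·.2)))) := by
  rw [show pvStep = (fun d x => d.modify x.1 PySem.Set.empty (fun s => PySem.Set.add s x.2)) from
    funext fun d => funext fun x => pvStep_eq d x]
  have hnd : (l.foldl (fun d x => d.modify x.1 PySem.Set.empty (fun s => PySem.Set.add s x.2))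
      PySem.Dict.empty).keys.Nodup :=
    PySem.Dict.nodup_keys_foldl_modify_key l (·.1) PySem.Set.empty (fun _ x s => PySem.Set.add s x.2)
      PySem.Dict.empty PySem.Dict.nodup_keys_empty
  rw [PySem.Dict.items_eq_map_keys _ hnd PySem.Set.empty,
    PySem.Dict.keys_foldl_modify_key l (·.1) PySem.Set.empty (fun _ x s => PySem.Set.add s x.2)]
  have hkeys : PySem.Set.update (PySem.Dict.empty : PySem.Dict String (PySem.Set (List String))).keys (l.map (·.1)) = PySem.List.dedup (l.map (·.1)) := by
    simp [PySem.List.dedup_eq_ofList, PySem.Set.ofList_eq_foldl, PySem.Set.update,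
      PySem.Dict.keys_empty]
  rw [hkeys]
  refine List.map_congr_left fun p _ => ?_
  rw [pvGetD_fold]
  simp [PySem.Dict.getD_empty, PySem.Set.ofList_eq_foldl, PySem.Set.update, PySem.Set.empty]

-- ===== VERDICT (by name: the statement is the Claim_ definition above) =====
theorem get_dict_from_state_spec : Claim_equal_get_dict_from_state := by
  intro state _
  unfold Spec_get_dict_from_state get_dict_from_state get_dict_from_state_alt
  have hA : (fun (ext : PySem.Dict String (PySem.Set (List String))) (atom : String) =>
      let fields := (PySem.Str.split? (PySem.Str.slice atom (some 1) (some (-1))) " ").getD []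
      let pred := fields.headD ""
      let args := fields.tail
      let ext' := if ext.contains pred then ext else ext.insert pred PySem.Set.empty
      ext'.modify pred PySem.Set.empty (fun s => PySem.Set.add s args))
      = fun ext atom => pvStep ext (pvParseAtom atom) := by
    funext ext atom
    delta pvStep pvParseAtom
    generalize (PySem.Str.split? (PySem.Str.slice atom (some 1) (some (-1))) " ").getD ([] : List String) = fs
    rfl
  rw [hA, ← List.foldl_map, pvItems_fold]
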